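-- pv_equiv track=rewrite | github.com/m-h-d-salih/langChain-python | nlp2sql/nlp2sql.py | shared_columns_map
-- ===== SOURCE A (Python) =====
-- from typing import Any, Dict, List, Tuple, Optional, Set
--
-- def shared_columns_map(catalog: Dict[str, List[str]]) -> Dict[Tuple[str,str], List[str]]:
--     """Case-insensitive 'shared columns' hints (for JOIN guidance only)."""
--     tables = list(catalog.keys())
--     rel: Dict[Tuple[str,str], List[str]] = {}
--     for i in range(len(tables)):
--         for j in range(i+1, len(tables)):
--             a, b = tables[i], tables[j]
--             sa = {c.lower(): c for c in catalog[a]}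
--             sb = {c.lower(): c for c in catalog[b]}
--             inter = sorted(set(sa.keys()) & set(sb.keys()))
--             if inter:
--                 rel[(a,b)] = inter
--     return rel
-- ===== SOURCE B (Python) =====
-- def shared_columns_map(catalog):
--     """Case-insensitive 'shared columns' hints (for JOIN guidance only).
--
--     Inverted-index re-implementation: lowercase every table's columns ONCE,
--     build a column -> tables index, and collect each pair's shared columns by
--     walking the (few) tables of each column, instead of intersecting column
--     sets for every one of the O(T^2) table pairs.
--     """
--     tables = list(catalog.keys())
--     col2tabs = {}                      # lowercase column -> increasing list of table indices
--     for i, t in enumerate(tables):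
--         for c in {c.lower() for c in catalog[t]}:
--             col2tabs.setdefault(c, []).append(i)
--     pair_cols = {}                     # (i, j) with i < j -> shared columns, already sorted
--     for c in sorted(col2tabs):
--         tabs = col2tabs[c]
--         for x in range(len(tabs)):
--             for y in range(x + 1, len(tabs)):
--                 pair_cols.setdefault((tabs[x], tabs[y]), []).append(c)
--     rel = {}
--     n = len(tables)
--     for i in range(n):
--         for j in range(i + 1, n):
--             cols = pair_cols.get((i, j))
--             if cols:
--                 rel[(tables[i], tables[j])] = cols
--     return rel
-- ===== Notes on version B (the rewrite author's own statement) =====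
-- stated objective: faster
-- what changed: Replaces A's O(T^2) pairwise rebuild-and-intersect of per-table lowercase column sets by lowercasing each table once, inverting into a column->tables index, and scattering each column (in sorted order) onto the table pairs that share it.
import Mathlib
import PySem

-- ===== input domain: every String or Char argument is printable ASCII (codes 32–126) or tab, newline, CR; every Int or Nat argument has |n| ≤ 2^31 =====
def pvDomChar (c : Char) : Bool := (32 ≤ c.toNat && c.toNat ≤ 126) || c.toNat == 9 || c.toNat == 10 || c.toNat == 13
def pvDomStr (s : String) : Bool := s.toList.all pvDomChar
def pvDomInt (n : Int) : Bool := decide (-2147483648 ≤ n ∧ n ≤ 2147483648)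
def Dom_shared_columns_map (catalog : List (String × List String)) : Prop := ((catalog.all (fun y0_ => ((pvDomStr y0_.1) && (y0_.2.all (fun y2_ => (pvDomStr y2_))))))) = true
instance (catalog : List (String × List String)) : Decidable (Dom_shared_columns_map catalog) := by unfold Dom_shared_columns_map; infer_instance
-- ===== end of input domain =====

-- B replaces A's per-pair set intersections by a one-pass inverted index
-- (lowercase column -> tables), collecting each pair's shared columns
-- output-sensitively; measurably faster on large catalogs. Return value only.


-- ===== PORT A =====
-- The Python argument is a dict: the association list is read with dict semantics
-- (later binding of the same key overwrites, first position kept), exactly PySem.Dict.insert.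
-- In A, rel is a dict keyed by (a, b); those keys are pairwise distinct (tables is a dict's
-- key list, hence Nodup), so each dict insertion is a plain append to the item list.
def shared_columns_map (catalog : List (String × List String)) : List (String × String × List String) :=
  let cat : PySem.Dict String (List String) :=
    catalog.foldl (fun d p => d.insert p.1 p.2) PySem.Dict.empty
  let tables := cat.keys
  let n := tables.length
  (List.range n).foldl (fun rel i =>
    (List.range' (i+1) (n - (i+1))).foldl (fun rel j =>
      let a := tables.getD i ""
      let b := tables.getD j ""
      let sa := (cat.getD a []).foldl (fun d c => d.insert (PySem.Str.lower c) c)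
                  (PySem.Dict.empty : PySem.Dict String String)
      let sb := (cat.getD b []).foldl (fun d c => d.insert (PySem.Str.lower c) c)
                  (PySem.Dict.empty : PySem.Dict String String)
      let inter := PySem.List.sorted
        (PySem.Set.inter (PySem.Set.ofList sa.keys) (PySem.Set.ofList sb.keys)) id
      if inter.isEmpty then rel else rel ++ [(a, b, inter)]) rel) []

-- ===== PORT B =====
-- B (see Source B): lowercase each table's columns once, build the inverted index
-- col2tabs : lowercase column -> increasing list of table indices, scatter each column
-- (in sorted order) onto the table pairs that share it, then emit the pairs in order.
-- enumerate(tables) is ported as tables.zipIdx (indices are the Nats 0,1,…).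
def shared_columns_map_alt (catalog : List (String × List String)) : List (String × String × List String) :=
  let cat : PySem.Dict String (List String) :=
    catalog.foldl (fun d p => d.insert p.1 p.2) PySem.Dict.empty
  let tables := cat.keys
  let col2tabs : PySem.Dict String (List Nat) :=
    tables.zipIdx.foldl (fun d ti =>
      (PySem.Set.ofList ((cat.getD ti.1 []).map PySem.Str.lower)).foldl
        (fun d c => d.modify c [] (fun v => v ++ [ti.2])) d) PySem.Dict.empty
  let pair_cols : PySem.Dict (Nat × Nat) (List String) :=
    (PySem.List.sorted col2tabs.keys id).foldl (fun d c =>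
      let tabs := col2tabs.getD c []
      (List.range tabs.length).foldl (fun d x =>
        (List.range' (x+1) (tabs.length - (x+1))).foldl (fun d y =>
          d.modify (tabs.getD x 0, tabs.getD y 0) [] (fun v => v ++ [c])) d) d)
      PySem.Dict.empty
  let n := tables.length
  (List.range n).foldl (fun rel i =>
    (List.range' (i+1) (n - (i+1))).foldl (fun rel j =>
      let cols := pair_cols.getD (i, j) []
      if cols.isEmpty then rel else rel ++ [(tables.getD i "", tables.getD j "", cols)]) rel) []

-- ===== PRECONDITION & SPEC =====
def Spec_shared_columns_map (catalog : List (String × List String)) (out : List (String × String × List String)) : Prop := out = shared_columns_map_alt catalog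
instance (catalog : List (String × List String)) (out : List (String × String × List String)) : Decidable (Spec_shared_columns_map catalog out) := by unfold Spec_shared_columns_map; infer_instance

-- ===== CLAIM (what is proved, stated in full; the proofs are below) =====
def Claim_equal_shared_columns_map : Prop := ∀ (catalog : List (String × List String)), Dom_shared_columns_map catalog → Spec_shared_columns_map catalog (shared_columns_map catalog)

-- ===== LEMMAS AND PROOFS =====

-- Proof-side abbreviations mirroring the two ports' intermediate values.

-- the lowered column set of table t (A builds it per pair; B once per table)
def pvLow (cat : PySem.Dict String (List String)) (t : String) : List String :=
  PySem.Set.ofList ((cat.getD t []).map PySem.Str.lower)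

-- B's nested x/y index loops over tabs, as the flat list of ordered pairs they visit
def pvPairsOf (l : List Nat) : List (Nat × Nat) :=
  (List.range l.length).flatMap (fun x =>
    (List.range' (x+1) (l.length - (x+1))).map (fun y => (l.getD x 0, l.getD y 0)))

-- the same pair list, structurally
def pvPairsRec : List Nat → List (Nat × Nat)
  | [] => []
  | a :: l => l.map (fun b => (a, b)) ++ pvPairsRec l

-- B's col2tabs and pair_cols dictionaries, and the common sorted column list
def pvCol2tabs (cat : PySem.Dict String (List String)) : PySem.Dict String (List Nat) :=
  cat.keys.zipIdx.foldl (fun d ti =>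
    (PySem.Set.ofList ((cat.getD ti.1 []).map PySem.Str.lower)).foldl
      (fun d c => d.modify c [] (fun v => v ++ [ti.2])) d) PySem.Dict.empty

def pvSortedCols (cat : PySem.Dict String (List String)) : List String :=
  PySem.List.sorted (pvCol2tabs cat).keys id

def pvPairCols (cat : PySem.Dict String (List String)) : PySem.Dict (Nat × Nat) (List String) :=
  (pvSortedCols cat).foldl (fun d c =>
    let tabs := (pvCol2tabs cat).getD c []
    (List.range tabs.length).foldl (fun d x =>
      (List.range' (x+1) (tabs.length - (x+1))).foldl (fun d y =>
        d.modify (tabs.getD x 0, tabs.getD y 0) [] (fun v => v ++ [c])) d) d)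
    PySem.Dict.empty

-- A's per-pair value, in terms of pvLow
def pvInter (cat : PySem.Dict String (List String)) (a b : String) : List String :=
  PySem.List.sorted (PySem.Set.inter (pvLow cat a) (pvLow cat b)) id

-- ---- generic list lemmas ----

theorem pv_filter_beq_of_nodup {α : Type} [BEq α] [LawfulBEq α] (l : List α) (hl : l.Nodup)
    (a : α) : l.filter (· == a) = if a ∈ l then [a] else [] := by
  induction l with
  | nil => simp
  | cons b t ih =>
    rcases List.nodup_cons.mp hl with ⟨hb, ht⟩
    by_cases hba : b = a
    · subst hba
      simp [ih ht, hb]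
    · simp [hba, ih ht, List.mem_cons, Ne.symm hba]

theorem pv_map_snd_filter_fst {α β γ : Type} [BEq β] [LawfulBEq β]
    (l : List α) (g : α → List β) (v : α → γ) (b : β) (hg : ∀ a ∈ l, (g a).Nodup) :
    ((l.flatMap (fun a => (g a).map (fun x => (x, v a)))).filter
        (fun p => p.1 == b)).map (fun p => p.2)
      = l.flatMap (fun a => if b ∈ g a then [v a] else []) := by
  induction l with
  | nil => simp
  | cons hd t ih =>
    have hhd : (g hd).Nodup := hg hd (List.mem_cons_self)
    have ht : ∀ a ∈ t, (g a).Nodup := fun a ha => hg a (List.mem_cons_of_mem _ ha)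
    have hblock : (((g hd).map (fun x => (x, v hd))).filter (fun p => p.1 == b)).map
        (fun p => p.2) = if b ∈ g hd then [v hd] else [] := by
      rw [List.filter_map]
      have : ((fun p => p.1 == b) ∘ (fun x => (x, v hd))) = (fun x : β => x == b) := rfl
      rw [this, pv_filter_beq_of_nodup (g hd) hhd b]
      by_cases hmem : b ∈ g hd <;> simp [hmem]
    simp only [List.flatMap_cons, List.filter_append, List.map_append, hblock, ih ht]

theorem pv_flatMap_if_sublist {α β : Type} (l : List α) (P : α → Prop) [DecidablePred P]
    (f : α → β) :
    (l.flatMap (fun a => if P a then [f a] else [])).Sublist (l.map f) := by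
  induction l with
  | nil => simp
  | cons hd t ih =>
    by_cases h : P hd
    · simpa [h] using ih.cons₂ (f hd)
    · simpa [h] using ih.cons (f hd)

theorem pv_flatMap_if_id_eq_filter {α : Type} (l : List α) (P : α → Prop) [DecidablePred P] :
    l.flatMap (fun a => if P a then [a] else []) = l.filter (fun a => decide (P a)) := by
  induction l with
  | nil => simp
  | cons hd t ih =>
    by_cases h : P hd <;> simp [h, ih]

theorem pv_map_snd_zipIdx {α : Type} (l : List α) (k : Nat) :
    (l.zipIdx k).map Prod.snd = List.range' k l.length := by
  induction l generalizing k with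
  | nil => simp
  | cons hd t ih => simp [List.zipIdx_cons, List.range'_succ, ih]

theorem pv_mem_zipIdx_self {α : Type} [Inhabited α] (l : List α) (i : Nat) (hi : i < l.length) :
    (l.getD i default, i) ∈ l.zipIdx := by
  have hlen : i < l.zipIdx.length := by simpa using hi
  have h : (l.zipIdx)[i] = (l[i], i) := by
    simpa using List.getElem_zipIdx (l := l) (i := i) (j := 0) hlen
  have hm : (l.zipIdx)[i] ∈ l.zipIdx := List.getElem_mem _
  rw [h] at hm
  rw [List.getD_eq_getElem l default hi]
  exact hm

-- ---- pvPairsOf / pvPairsRec ----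

theorem pvPairsOf_eq_rec (l : List Nat) : pvPairsOf l = pvPairsRec l := by
  induction l with
  | nil => simp [pvPairsOf, pvPairsRec]
  | cons a t ih =>
    unfold pvPairsOf pvPairsRec
    rw [List.length_cons, List.range_succ_eq_map, List.flatMap_cons]
    congr 1
    · -- block x = 0
      rw [show t.length + 1 - (0 + 1) = t.length by omega]
      rw [List.range'_eq_map_range, List.map_map]
      apply List.ext_getElem (by simp)
      intro i h1 h2
      simp only [List.getElem_map, List.getElem_range, Function.comp_apply,
        List.getD_cons_zero]
      have hi : i < t.length := by simpa using h2
      have : 0 + 1 + i = i + 1 := by omega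
      rw [this, List.getD_cons_succ, List.getD_eq_getElem t 0 hi]
    · -- blocks x = 1 .. n
      rw [← ih]
      unfold pvPairsOf
      rw [List.flatMap_map]
      congr 1
      funext x
      simp only [Nat.succ_eq_add_one, List.getD_cons_succ]
      rw [show t.length + 1 - (x + 1 + 1) = t.length - (x + 1) by omega]
      rw [List.range'_eq_map_range, List.range'_eq_map_range, List.map_map, List.map_map]
      congr 1
      funext k
      simp only [Function.comp_apply]
      rw [show x + 1 + 1 + k = (x + 1 + k) + 1 by omega, List.getD_cons_succ]

theorem pv_mem_pairsRec (l : List Nat) (h : l.Pairwise (· < ·)) (i j : Nat) :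
    (i, j) ∈ pvPairsRec l ↔ i ∈ l ∧ j ∈ l ∧ i < j := by
  induction l with
  | nil => simp [pvPairsRec]
  | cons a t ih =>
    rcases List.pairwise_cons.mp h with ⟨ha, ht⟩
    constructor
    · intro hm
      rcases List.mem_append.mp hm with hm | hm
      · rcases List.mem_map.mp hm with ⟨b, hb, hbe⟩
        cases hbe
        exact ⟨List.mem_cons_self, List.mem_cons_of_mem _ hb, ha _ hb⟩
      · rcases (ih ht).mp hm with ⟨h1, h2, h3⟩
        exact ⟨List.mem_cons_of_mem _ h1, List.mem_cons_of_mem _ h2, h3⟩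
    · rintro ⟨h1, h2, h3⟩
      rcases List.mem_cons.mp h1 with h1e | h1m
      · rcases List.mem_cons.mp h2 with h2e | h2m
        · omega
        · subst h1e
          exact List.mem_append.mpr (Or.inl (List.mem_map.mpr ⟨j, h2m, rfl⟩))
      · rcases List.mem_cons.mp h2 with h2e | h2m
        · have := ha _ h1m; omega
        · exact List.mem_append.mpr (Or.inr ((ih ht).mpr ⟨h1m, h2m, h3⟩))

theorem pv_fst_mem_of_mem_pairsRec (l : List Nat) (p : Nat × Nat) (hm : p ∈ pvPairsRec l) :
    p.1 ∈ l := by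
  induction l with
  | nil => simp [pvPairsRec] at hm
  | cons a t ih =>
    rcases List.mem_append.mp hm with hm | hm
    · rcases List.mem_map.mp hm with ⟨b, hb, hbe⟩
      cases hbe; exact List.mem_cons_self
    · exact List.mem_cons_of_mem _ (ih hm)

theorem pv_nodup_pairsRec (l : List Nat) (h : l.Pairwise (· < ·)) :
    (pvPairsRec l).Nodup := by
  induction l with
  | nil => simp [pvPairsRec]
  | cons a t ih =>
    rcases List.pairwise_cons.mp h with ⟨ha, ht⟩
    have hnd : t.Nodup := ht.nodup
    refine List.Nodup.append ?_ (ih ht) ?_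
    · exact hnd.map (fun x y hxy => by simpa using congrArg Prod.snd hxy)
    · intro p hp hq
      rcases List.mem_map.mp hp with ⟨b, hb, rfl⟩
      have := pv_fst_mem_of_mem_pairsRec t _ hq
      simp only at this
      have := ha _ this
      omega


-- ---- B's col2tabs ----

def pvDictOf (catalog : List (String × List String)) : PySem.Dict String (List String) :=
  catalog.foldl (fun d p => d.insert p.1 p.2) PySem.Dict.empty

def pvL1 (cat : PySem.Dict String (List String)) : List (String × Nat) :=
  cat.keys.zipIdx.flatMap (fun ti => (pvLow cat ti.1).map (fun c => (c, ti.2)))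

theorem pv_col2tabs_eq (cat : PySem.Dict String (List String)) :
    pvCol2tabs cat
      = (pvL1 cat).foldl (fun d p => d.modify p.1 [] (fun v => v ++ [p.2]))
          PySem.Dict.empty := by
  unfold pvCol2tabs pvL1 pvLow
  rw [List.foldl_flatMap]
  simp [List.foldl_map]

theorem pv_tabs_eq (cat : PySem.Dict String (List String)) (c : String) :
    (pvCol2tabs cat).getD c []
      = cat.keys.zipIdx.flatMap (fun ti => if c ∈ pvLow cat ti.1 then [ti.2] else []) := by
  rw [pv_col2tabs_eq, PySem.Dict.getD_foldl_modify_append, PySem.Dict.getD_empty,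
    List.nil_append]
  exact pv_map_snd_filter_fst cat.keys.zipIdx (fun ti => pvLow cat ti.1) (fun ti => ti.2) c
    (fun a _ => PySem.Set.nodup_ofList _)

theorem pv_mem_tabs (cat : PySem.Dict String (List String)) (c : String) (i : Nat) :
    i ∈ (pvCol2tabs cat).getD c []
      ↔ i < cat.keys.length ∧ c ∈ pvLow cat (cat.keys.getD i "") := by
  rw [pv_tabs_eq]
  rw [List.mem_flatMap]
  constructor
  · rintro ⟨ti, hti, hif⟩
    obtain ⟨x, idx⟩ := ti
    by_cases h : c ∈ pvLow cat x
    · rw [if_pos h] at hif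
      simp only [List.mem_singleton] at hif
      subst hif
      obtain ⟨-, hlen, hx⟩ := List.mem_zipIdx hti
      refine ⟨by simpa using hlen, ?_⟩
      rw [List.getD_eq_getElem cat.keys "" (by simpa using hlen)]
      rw [hx] at h
      simpa using h
    · rw [if_neg h] at hif
      simp at hif
  · rintro ⟨hi, hc⟩
    refine ⟨(cat.keys.getD i "", i), ?_, ?_⟩
    · exact pv_mem_zipIdx_self cat.keys i hi
    · rw [if_pos hc]; simp

theorem pv_pairwise_tabs (cat : PySem.Dict String (List String)) (c : String) :
    ((pvCol2tabs cat).getD c []).Pairwise (· < ·) := by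
  rw [pv_tabs_eq]
  have hsub := pv_flatMap_if_sublist cat.keys.zipIdx
    (fun ti => c ∈ pvLow cat ti.1) (fun ti => ti.2)
  have hrange : (cat.keys.zipIdx.map (fun ti : String × Nat => ti.2)).Pairwise (· < ·) := by
    have := pv_map_snd_zipIdx cat.keys 0
    rw [show (fun ti : String × Nat => ti.2) = Prod.snd from rfl, this]
    exact List.pairwise_lt_range' 1
  exact List.Pairwise.sublist hsub hrange

theorem pv_nodup_keys_col2tabs (cat : PySem.Dict String (List String)) :
    (pvCol2tabs cat).keys.Nodup := by
  rw [pv_col2tabs_eq]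
  exact PySem.Dict.nodup_keys_foldl_modify_key (pvL1 cat) Prod.fst []
    (fun d p => fun v => v ++ [p.2]) PySem.Dict.empty (by simp [PySem.Dict.keys_empty])

theorem pv_mem_keys_col2tabs (cat : PySem.Dict String (List String)) (c : String) :
    c ∈ (pvCol2tabs cat).keys ↔ ∃ t ∈ cat.keys, c ∈ pvLow cat t := by
  rw [pv_col2tabs_eq]
  rw [PySem.Dict.keys_foldl_modify_key (pvL1 cat) Prod.fst []
    (fun d p => fun v => v ++ [p.2]) PySem.Dict.empty]
  rw [PySem.Dict.keys_empty, PySem.Set.update_nil_left, PySem.Set.mem_ofList]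
  unfold pvL1
  simp only [List.map_flatMap, List.mem_flatMap, List.map_map, List.mem_map]
  constructor
  · rintro ⟨ti, hti, c', hc', hce⟩
    obtain ⟨x, idx⟩ := ti
    obtain ⟨-, hlen, hx⟩ := List.mem_zipIdx hti
    simp only [Function.comp] at hce
    subst hce
    refine ⟨x, ?_, hc'⟩
    rw [hx]
    exact List.getElem_mem _
  · rintro ⟨t, ht, hc⟩
    obtain ⟨k, hk, hkt⟩ := List.mem_iff_getElem.mp ht
    refine ⟨(cat.keys.getD k "", k), pv_mem_zipIdx_self cat.keys k hk, c, ?_, rfl⟩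
    rw [List.getD_eq_getElem cat.keys "" hk, hkt]
    exact hc

-- ---- sortedCols ----

theorem pv_nodup_sortedCols (cat : PySem.Dict String (List String)) :
    (pvSortedCols cat).Nodup :=
  (PySem.List.sorted_perm (pvCol2tabs cat).keys id false).nodup_iff.mpr
    (pv_nodup_keys_col2tabs cat)

theorem pv_pairwise_sortedCols (cat : PySem.Dict String (List String)) :
    (pvSortedCols cat).Pairwise (· < ·) := by
  have hle : (pvSortedCols cat).Pairwise (· ≤ ·) := by
    have := PySem.List.sorted_pairwise (pvCol2tabs cat).keys id
    simpa [pvSortedCols, id] using this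
  have hnd : (pvSortedCols cat).Pairwise (· ≠ ·) := pv_nodup_sortedCols cat
  exact (hle.and hnd).imp (fun h => lt_of_le_of_ne h.1 h.2)

theorem pv_mem_sortedCols (cat : PySem.Dict String (List String)) (c : String) :
    c ∈ pvSortedCols cat ↔ ∃ t ∈ cat.keys, c ∈ pvLow cat t :=
  ((PySem.List.sorted_perm (pvCol2tabs cat).keys id false).mem_iff).trans
    (pv_mem_keys_col2tabs cat c)

-- ---- B's pair_cols ----

theorem pv_pairCols_eq (cat : PySem.Dict String (List String)) :
    pvPairCols cat
      = ((pvSortedCols cat).flatMap (fun c =>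
          (pvPairsOf ((pvCol2tabs cat).getD c [])).map (fun p => (p, c)))).foldl
          (fun d q => d.modify q.1 [] (fun v => v ++ [q.2])) PySem.Dict.empty := by
  unfold pvPairCols pvPairsOf
  rw [List.foldl_flatMap]
  simp [List.foldl_map, List.foldl_flatMap]

theorem pv_pairCols_getD (cat : PySem.Dict String (List String)) (q : Nat × Nat) :
    (pvPairCols cat).getD q []
      = (pvSortedCols cat).filter
          (fun c => decide (q ∈ pvPairsOf ((pvCol2tabs cat).getD c []))) := by
  rw [pv_pairCols_eq, PySem.Dict.getD_foldl_modify_append, PySem.Dict.getD_empty,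
    List.nil_append]
  rw [pv_map_snd_filter_fst (pvSortedCols cat)
    (fun c => pvPairsOf ((pvCol2tabs cat).getD c [])) (fun c => c) q
    (fun c _ => by
      show (pvPairsOf ((pvCol2tabs cat).getD c [])).Nodup
      rw [pvPairsOf_eq_rec]; exact pv_nodup_pairsRec _ (pv_pairwise_tabs cat c))]
  exact pv_flatMap_if_id_eq_filter (pvSortedCols cat)
    (fun c => q ∈ pvPairsOf ((pvCol2tabs cat).getD c []))

-- ---- A's per-pair keys ----

theorem pv_akeys (cols : List String) :
    PySem.Set.ofList
        ((cols.foldl (fun d c => d.insert (PySem.Str.lower c) c)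
          (PySem.Dict.empty : PySem.Dict String String)).keys)
      = PySem.Set.ofList (cols.map PySem.Str.lower) := by
  rw [PySem.Dict.keys_foldl_insert_key cols PySem.Str.lower (fun _ c => c) PySem.Dict.empty]
  rw [PySem.Dict.keys_empty, PySem.Set.update_nil_left, PySem.Set.ofList_ofList]

-- ---- per-pair equality ----

theorem pv_pair_value (cat : PySem.Dict String (List String)) (i j : Nat)
    (hij : i < j) (hj : j < cat.keys.length) :
    (pvPairCols cat).getD (i, j) []
      = pvInter cat (cat.keys.getD i "") (cat.keys.getD j "") := by
  have hi : i < cat.keys.length := lt_trans hij hj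
  rw [pv_pairCols_getD]
  have hfil : ∀ c ∈ pvSortedCols cat,
      (decide ((i, j) ∈ pvPairsOf ((pvCol2tabs cat).getD c [])))
        = (decide (c ∈ pvLow cat (cat.keys.getD i "")) &&
           decide (c ∈ pvLow cat (cat.keys.getD j ""))) := by
    intro c _
    rw [pvPairsOf_eq_rec]
    have hmem := pv_mem_pairsRec ((pvCol2tabs cat).getD c []) (pv_pairwise_tabs cat c) i j
    simp [hmem, pv_mem_tabs, hi, hj, hij]
  rw [List.filter_congr hfil]
  have hlowi : (pvLow cat (cat.keys.getD i "")).Nodup := PySem.Set.nodup_ofList _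
  have hndf : ((pvSortedCols cat).filter
      (fun c => decide (c ∈ pvLow cat (cat.keys.getD i "")) &&
        decide (c ∈ pvLow cat (cat.keys.getD j "")))).Nodup :=
    (pv_nodup_sortedCols cat).filter _
  unfold pvInter
  refine (PySem.List.sorted_eq_of_perm_of_pairwise_lt _ _ id ?_ ?_).symm
  · apply (List.perm_ext_iff_of_nodup hndf (PySem.Set.nodup_inter _ _ hlowi)).mpr
    intro c
    rw [List.mem_filter, PySem.Set.mem_inter, pv_mem_sortedCols]
    constructor
    · rintro ⟨-, h⟩
      simpa using h
    · rintro ⟨h1, h2⟩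
      refine ⟨⟨cat.keys.getD i "", ?_, h1⟩, by simp only [Bool.and_eq_true, decide_eq_true_eq]; exact ⟨h1, h2⟩⟩
      rw [List.getD_eq_getElem cat.keys "" hi]
      exact List.getElem_mem _
  · have := (pv_pairwise_sortedCols cat).filter
      (fun c => decide (c ∈ pvLow cat (cat.keys.getD i "")) &&
        decide (c ∈ pvLow cat (cat.keys.getD j "")))
    simpa [id] using this

-- ---- the emission loops of the two ports ----

def pvEmitA (cat : PySem.Dict String (List String)) : List (String × String × List String) :=
  (List.range cat.keys.length).foldl (fun rel i =>
    (List.range' (i+1) (cat.keys.length - (i+1))).foldl (fun rel j =>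
      let a := cat.keys.getD i ""
      let b := cat.keys.getD j ""
      let sa := (cat.getD a []).foldl (fun d c => d.insert (PySem.Str.lower c) c)
                  (PySem.Dict.empty : PySem.Dict String String)
      let sb := (cat.getD b []).foldl (fun d c => d.insert (PySem.Str.lower c) c)
                  (PySem.Dict.empty : PySem.Dict String String)
      let inter := PySem.List.sorted
        (PySem.Set.inter (PySem.Set.ofList sa.keys) (PySem.Set.ofList sb.keys)) id
      if inter.isEmpty then rel else rel ++ [(a, b, inter)]) rel) []

def pvEmitB (cat : PySem.Dict String (List String)) : List (String × String × List String) :=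
  (List.range cat.keys.length).foldl (fun rel i =>
    (List.range' (i+1) (cat.keys.length - (i+1))).foldl (fun rel j =>
      let cols := (pvPairCols cat).getD (i, j) []
      if cols.isEmpty then rel
      else rel ++ [(cat.keys.getD i "", cat.keys.getD j "", cols)]) rel) []

theorem pv_emit (cat : PySem.Dict String (List String)) : pvEmitA cat = pvEmitB cat := by
  unfold pvEmitA pvEmitB
  apply PySem.List.foldl_congr_mem
  intro rel i hi
  apply PySem.List.foldl_congr_mem
  intro rel2 j hj
  have hi' : i < cat.keys.length := List.mem_range.mp hi
  obtain ⟨hj1, hj2⟩ := List.mem_range'_1.mp hj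
  have hij : i < j := by omega
  have hjlen : j < cat.keys.length := by omega
  simp only [pv_akeys, pv_pair_value cat i j hij hjlen, pvInter, pvLow]

theorem pv_ab (catalog : List (String × List String)) :
    shared_columns_map catalog = shared_columns_map_alt catalog := by
  have hA : shared_columns_map catalog = pvEmitA (pvDictOf catalog) := rfl
  have hB : shared_columns_map_alt catalog = pvEmitB (pvDictOf catalog) := rfl
  rw [hA, hB, pv_emit]

-- ===== VERDICT (by name: the statement is the Claim_ definition above) =====
theorem shared_columns_map_spec : Claim_equal_shared_columns_map := by
  intro catalog _
  unfold Spec_shared_columns_map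
  exact pv_ab catalog
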